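-- pv_equiv track=rewrite | github.com/dmwm/T0 | test/python/validate_config.py | check_gaps
-- ===== SOURCE A (Python) =====
-- def check_gaps(families):
--     issues = []
--     for family, members in sorted(families.items()):
--         indices = sorted(members.keys())
--         min_idx = indices[0]
--         max_idx = indices[-1]
--
--         if min_idx != 0:
--             issues.append((
--                 "WARNING",
--                 family,
--                 "Family starts at index %d instead of 0 (members: %s)"
--                 % (min_idx, ", ".join(str(i) for i in indices))
--             ))
--
--         expected = set(range(min_idx, max_idx + 1))
--         actual = set(indices)
--         missing = sorted(expected - actual)
--         if missing:
--             issues.append((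
--                 "ERROR",
--                 family,
--                 "Gap detected: missing index %s (found: %s)"
--                 % (", ".join(str(i) for i in missing),
--                    ", ".join(str(i) for i in indices))
--             ))
--
--     return issues
-- ===== SOURCE B (Python) =====
-- def check_gaps(families):
--     def family_issues(family, members):
--         indices = sorted(members)
--         out = []
--         if indices[0] != 0:
--             out.append((
--                 "WARNING",
--                 family,
--                 "Family starts at index %d instead of 0 (members: %s)"
--                 % (indices[0], ", ".join(map(str, indices)))
--             ))
--         missing = []
--         for prev, cur in zip(indices, indices[1:]):
--             missing.extend(range(prev + 1, cur))
--         if missing: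
--             out.append((
--                 "ERROR",
--                 family,
--                 "Gap detected: missing index %s (found: %s)"
--                 % (", ".join(map(str, missing)), ", ".join(map(str, indices)))
--             ))
--         return out
--     return [issue
--             for family, members in sorted(families.items())
--             for issue in family_issues(family, members)]
-- ===== Notes on version B (the rewrite author's own statement) =====
-- stated objective: alternative
-- what changed: The missing-index computation set(range(min,max+1)) - set(indices) followed by sorted() is replaced by a single linear scan over consecutive pairs of the sorted indices that emits each gap range already in order, and the result is built as a flat comprehension over a per-family helper instead of an accumulator loop.
import Mathlib
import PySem

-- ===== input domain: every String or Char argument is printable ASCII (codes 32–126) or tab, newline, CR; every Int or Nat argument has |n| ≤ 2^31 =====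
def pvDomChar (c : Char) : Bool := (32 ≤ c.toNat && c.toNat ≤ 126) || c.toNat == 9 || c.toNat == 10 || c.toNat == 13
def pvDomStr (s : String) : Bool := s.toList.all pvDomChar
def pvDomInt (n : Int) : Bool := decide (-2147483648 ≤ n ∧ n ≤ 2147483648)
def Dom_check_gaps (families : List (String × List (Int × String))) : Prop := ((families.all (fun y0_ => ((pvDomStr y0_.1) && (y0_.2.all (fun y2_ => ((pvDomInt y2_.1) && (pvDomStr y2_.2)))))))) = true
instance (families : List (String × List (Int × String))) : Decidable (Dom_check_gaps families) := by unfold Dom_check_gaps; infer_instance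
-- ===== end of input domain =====

-- B replaces A's set(range(min,max+1)) - set(indices) + sort by a direct adjacent-pair scan of the
-- sorted indices that emits each gap range in order, and builds the result as a flat comprehension
-- over families instead of an accumulator loop (objective: alternative; same asymptotic cost).

-- shared string-formatting helpers (", ".join(str(i) …) and the two % formats, identical in A and B)
def pvFmtIdx (l : List Int) : String := PySem.Str.join ", " (l.map PySem.Int.toStr)
def pvWarnMsg (m : Int) (indices : List Int) : String :=
  "Family starts at index " ++ PySem.Int.toStr m ++ " instead of 0 (members: " ++ pvFmtIdx indices ++ ")"
def pvErrMsg (missing indices : List Int) : String :=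
  "Gap detected: missing index " ++ pvFmtIdx missing ++ " (found: " ++ pvFmtIdx indices ++ ")"

-- ===== PORT A =====
-- sorted(families.items()) compares (key, value) tuples; under Pre_ keys are distinct, so sorting
-- by the key alone is exact.  The `| _, _ =>` arm is Python's IndexError on empty members
-- (indices[0]), excluded by Pre_.
def check_gaps (families : List (String × List (Int × String))) : List (String × String × String) :=
  (PySem.List.sorted families (fun p => p.1) false).foldl
    (fun issues fm =>
      let indices := PySem.List.sorted (fm.2.map (fun m => m.1)) (fun x => x) false
      match PySem.List.pyGet? indices 0, PySem.List.pyGet? indices (-1) with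
      | some min_idx, some max_idx =>
          let issues := if min_idx ≠ 0 then issues ++ [("WARNING", fm.1, pvWarnMsg min_idx indices)] else issues
          let expected := PySem.Set.ofList (PySem.List.pyRange min_idx (max_idx + 1) 1)
          let actual := PySem.Set.ofList indices
          let missing := PySem.List.sorted (PySem.Set.diff expected actual) (fun x => x) false
          if missing ≠ [] then issues ++ [("ERROR", fm.1, pvErrMsg missing indices)] else issues
      | _, _ => issues)
    []

-- ===== PORT B =====
-- per-family helper of Source B; the `| none =>` arm is Python's IndexError on empty members, excluded by Pre_
def family_issues (family : String) (members : List (Int × String)) : List (String × String × String) :=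
  let indices := PySem.List.sorted (members.map (fun m => m.1)) (fun x => x) false
  match PySem.List.pyGet? indices 0 with
  | some i0 =>
      let warn := if i0 ≠ 0 then [("WARNING", family, pvWarnMsg i0 indices)] else []
      let missing := (indices.zip (PySem.List.slice indices (some 1) none)).foldl
          (fun acc pc => acc ++ PySem.List.pyRange (pc.1 + 1) pc.2 1) []
      warn ++ (if missing ≠ [] then [("ERROR", family, pvErrMsg missing indices)] else [])
  | none => []

def check_gaps_alt (families : List (String × List (Int × String))) : List (String × String × String) :=
  (PySem.List.sorted families (fun p => p.1) false).flatMap (fun fm => family_issues fm.1 fm.2)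

-- ===== PRECONDITION & SPEC =====
-- Pre_ excludes empty member dicts, on which Python A raises IndexError at indices[0]; it also
-- requires distinct outer and inner keys, because the association lists encode Python dicts,
-- whose keys are necessarily unique (a duplicate-key list represents no dict input of A).
def Pre_check_gaps (families : List (String × List (Int × String))) : Prop :=
  (families.map (fun p => p.1)).Nodup ∧
  ∀ fm ∈ families, fm.2 ≠ [] ∧ (fm.2.map (fun m => m.1)).Nodup
instance (families : List (String × List (Int × String))) : Decidable (Pre_check_gaps families) := by
  unfold Pre_check_gaps; infer_instance

def pvWitness_check_gaps : (List (String × List (Int × String))) :=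
  [("f", [((0 : Int), "a"), ((2 : Int), "b")])]

def Spec_check_gaps (families : List (String × List (Int × String))) (out : List (String × String × String)) : Prop := out = check_gaps_alt families
instance (families : List (String × List (Int × String))) (out : List (String × String × String)) : Decidable (Spec_check_gaps families out) := by unfold Spec_check_gaps; infer_instance

-- ===== CLAIM (what is proved, stated in full; the proofs are below) =====
def Claim_equal_check_gaps : Prop := ∀ (families : List (String × List (Int × String))), Dom_check_gaps families → Pre_check_gaps families → Spec_check_gaps families (check_gaps families)

-- ===== LEMMAS AND PROOFS =====

-- the flat gap list B computes for a sorted index list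
def pvGaps (l : List Int) : List Int :=
  (l.zip l.tail).flatMap (fun pc => PySem.List.pyRange (pc.1 + 1) pc.2 1)

theorem pvGaps_cons_cons (a b : Int) (t : List Int) :
    pvGaps (a :: b :: t) = PySem.List.pyRange (a + 1) b 1 ++ pvGaps (b :: t) := rfl

theorem pvHead_le (b : Int) (t : List Int) (h : (b :: t).Pairwise (· < ·)) :
    ∀ y ∈ b :: t, b ≤ y := by
  intro y hy
  rcases List.mem_cons.mp hy with rfl | hy
  · exact le_refl _
  · exact le_of_lt ((List.pairwise_cons.mp h).1 y hy)

theorem pvMem_gaps (t : List Int) : ∀ (a : Int), (a :: t).Pairwise (· < ·) →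
    ∀ x, x ∈ pvGaps (a :: t) ↔ a ≤ x ∧ x ≤ (a :: t).getLast (by simp) ∧ x ∉ (a :: t) := by
  induction t with
  | nil =>
    intro a _ x
    simp [pvGaps]
    omega
  | cons b t' ih =>
    intro a hp x
    have hab : a < b := (List.pairwise_cons.mp hp).1 b (by simp)
    have hp' : (b :: t').Pairwise (· < ·) := (List.pairwise_cons.mp hp).2
    have hble : ∀ y ∈ b :: t', b ≤ y := pvHead_le b t' hp'
    have hlast : (a :: b :: t').getLast (by simp) = (b :: t').getLast (by simp) := by
      simp [List.getLast_cons]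
    have hbl : b ≤ (b :: t').getLast (by simp) := hble _ (List.getLast_mem _)
    rw [pvGaps_cons_cons, List.mem_append, ih b hp' x, PySem.List.mem_pyRange_one, hlast]
    constructor
    · rintro (⟨h1, h2⟩ | ⟨h1, h2, h3⟩)
      · refine ⟨by omega, by omega, ?_⟩
        intro hx
        rcases List.mem_cons.mp hx with rfl | hx
        · omega
        · exact absurd (hble x hx) (by omega)
      · refine ⟨by omega, h2, ?_⟩
        intro hx
        rcases List.mem_cons.mp hx with rfl | hx
        · omega
        · exact h3 hx
    · rintro ⟨h1, h2, h3⟩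
      have hxa : x ≠ a := fun he => h3 (he ▸ List.mem_cons_self ..)
      have hxn : x ∉ b :: t' := fun hx => h3 (List.mem_cons_of_mem _ hx)
      have hxb : x ≠ b := fun he => hxn (he ▸ List.mem_cons_self ..)
      by_cases hlt : x < b
      · exact Or.inl ⟨by omega, hlt⟩
      · exact Or.inr ⟨by omega, h2, hxn⟩

theorem pvGaps_pairwise (t : List Int) : ∀ (a : Int), (a :: t).Pairwise (· < ·) →
    (pvGaps (a :: t)).Pairwise (· < ·) := by
  induction t with
  | nil => intro a _; simp [pvGaps]
  | cons b t' ih =>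
    intro a hp
    have hp' : (b :: t').Pairwise (· < ·) := (List.pairwise_cons.mp hp).2
    rw [pvGaps_cons_cons]
    refine List.pairwise_append.mpr ⟨PySem.List.pairwise_lt_pyRange_one _ _, ih b hp', ?_⟩
    intro x hx y hy
    have hx' := (PySem.List.mem_pyRange_one.mp hx).2
    have hy' := (pvMem_gaps t' b hp' y).mp hy
    have : y ≠ b := fun he => hy'.2.2 (he ▸ List.mem_cons_self ..)
    omega

-- B's adjacent-pair scan equals A's sorted set difference, for a strictly increasing index list
theorem pvMissing_eq (a : Int) (t : List Int) (hp : (a :: t).Pairwise (· < ·)) :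
    PySem.List.sorted
      (PySem.Set.diff (PySem.Set.ofList (PySem.List.pyRange a ((a :: t).getLast (by simp) + 1) 1))
        (PySem.Set.ofList (a :: t))) (fun x => x) false
    = pvGaps (a :: t) := by
  apply PySem.List.sorted_eq_of_perm_of_pairwise_lt
  · apply (List.perm_ext_iff_of_nodup ?_ ?_).mpr
    · intro x
      rw [pvMem_gaps t a hp x, PySem.Set.mem_diff, PySem.Set.mem_ofList, PySem.Set.mem_ofList,
        PySem.List.mem_pyRange_one]
      constructor
      · rintro ⟨h1, h2, h3⟩; exact ⟨⟨h1, by omega⟩, h3⟩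
      · rintro ⟨⟨h1, h2⟩, h3⟩; exact ⟨h1, by omega, h3⟩
    · exact (pvGaps_pairwise t a hp).imp ne_of_lt
    · exact PySem.Set.nodup_diff _ _ (PySem.Set.nodup_ofList _)
  · exact pvGaps_pairwise t a hp

-- the per-family bodies of the two ports agree
theorem pvFamily_eq (fm : String × List (Int × String)) (hne : fm.2 ≠ [])
    (hnd : (fm.2.map (fun m => m.1)).Nodup) :
    (let indices := PySem.List.sorted (fm.2.map (fun m => m.1)) (fun x => x) false
     match PySem.List.pyGet? indices 0, PySem.List.pyGet? indices (-1) with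
     | some min_idx, some max_idx =>
         let issues := if min_idx ≠ 0 then ([("WARNING", fm.1, pvWarnMsg min_idx indices)] : List (String × String × String)) else []
         let expected := PySem.Set.ofList (PySem.List.pyRange min_idx (max_idx + 1) 1)
         let actual := PySem.Set.ofList indices
         let missing := PySem.List.sorted (PySem.Set.diff expected actual) (fun x => x) false
         if missing ≠ [] then issues ++ [("ERROR", fm.1, pvErrMsg missing indices)] else issues
     | _, _ => [])
    = family_issues fm.1 fm.2 := by
  have hmapne : fm.2.map (fun m => m.1) ≠ [] := by
    simpa [List.map_eq_nil_iff] using hne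
  obtain ⟨a, t, hat⟩ : ∃ a t, PySem.List.sorted (fm.2.map (fun m => m.1)) (fun x => x) false = a :: t := by
    rcases h : PySem.List.sorted (fm.2.map (fun m => m.1)) (fun x => x) false with _ | ⟨a, t⟩
    · have hperm := PySem.List.sorted_perm (xs := fm.2.map (fun m => m.1)) (key := fun x => x) (rev := false)
      rw [h] at hperm
      exact absurd hperm.symm.eq_nil hmapne
    · exact ⟨a, t, h⟩
  have hpw : (a :: t).Pairwise (· < ·) := by
    have h1 : (a :: t).Pairwise (· ≤ ·) := by
      have := PySem.List.sorted_pairwise (xs := fm.2.map (fun m => m.1)) (key := fun x => x)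
      rw [hat] at this; exact this
    have h2 : (a :: t).Nodup := by
      have hperm := PySem.List.sorted_perm (xs := fm.2.map (fun m => m.1)) (key := fun x => x) (rev := false)
      rw [hat] at hperm
      exact hperm.nodup_iff.mpr hnd
    exact (h1.and h2).imp (fun h => lt_of_le_of_ne h.1 h.2)
  have hlast : (a :: t).getLast? = some ((a :: t).getLast (by simp)) := by
    simp [List.getLast?_eq_some_getLast]
  have hfold : ((a :: t).zip ((a :: t).tail)).foldl
      (fun acc pc => acc ++ PySem.List.pyRange (pc.1 + 1) pc.2 1) [] = pvGaps (a :: t) := by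
    rw [PySem.List.foldl_append_eq_flatMap]
    simp [pvGaps]
  unfold family_issues
  rw [hat]
  simp only [PySem.List.pyGet?_zero_cons, PySem.List.pyGet?_neg_one, hlast,
    PySem.List.slice_from_one, hfold, pvMissing_eq a t hpw]
  split_ifs <;> simp

-- A's loop body appends a per-family block; name that block
def pvBlockA (fm : String × List (Int × String)) : List (String × String × String) :=
  let indices := PySem.List.sorted (fm.2.map (fun m => m.1)) (fun x => x) false
  match PySem.List.pyGet? indices 0, PySem.List.pyGet? indices (-1) with
  | some min_idx, some max_idx =>
      let issues := if min_idx ≠ 0 then ([("WARNING", fm.1, pvWarnMsg min_idx indices)] : List (String × String × String)) else []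
      let expected := PySem.Set.ofList (PySem.List.pyRange min_idx (max_idx + 1) 1)
      let actual := PySem.Set.ofList indices
      let missing := PySem.List.sorted (PySem.Set.diff expected actual) (fun x => x) false
      if missing ≠ [] then issues ++ [("ERROR", fm.1, pvErrMsg missing indices)] else issues
  | _, _ => []

theorem pvBodyA (issues : List (String × String × String)) (fm : String × List (Int × String)) :
    (let indices := PySem.List.sorted (fm.2.map (fun m => m.1)) (fun x => x) false
     match PySem.List.pyGet? indices 0, PySem.List.pyGet? indices (-1) with
     | some min_idx, some max_idx =>
         let issues := if min_idx ≠ 0 then issues ++ [("WARNING", fm.1, pvWarnMsg min_idx indices)] else issues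
         let expected := PySem.Set.ofList (PySem.List.pyRange min_idx (max_idx + 1) 1)
         let actual := PySem.Set.ofList indices
         let missing := PySem.List.sorted (PySem.Set.diff expected actual) (fun x => x) false
         if missing ≠ [] then issues ++ [("ERROR", fm.1, pvErrMsg missing indices)] else issues
     | _, _ => issues)
    = issues ++ pvBlockA fm := by
  unfold pvBlockA
  cases h0 : PySem.List.pyGet? (PySem.List.sorted (fm.2.map (fun m => m.1)) (fun x => x) false) 0 with
  | none => simp only [h0]; simp
  | some mn =>
    cases h1 : PySem.List.pyGet? (PySem.List.sorted (fm.2.map (fun m => m.1)) (fun x => x) false) (-1) with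
    | none => simp only [h0, h1]; simp
    | some mx =>
      simp only [h0, h1]
      split_ifs <;> simp

-- ===== VERDICT (by name: the statement is the Claim_ definition above) =====
theorem check_gaps_spec : Claim_equal_check_gaps := by
  intro families _ hpre
  unfold Spec_check_gaps check_gaps check_gaps_alt
  calc (PySem.List.sorted families (fun p => p.1) false).foldl _ []
      = (PySem.List.sorted families (fun p => p.1) false).foldl (fun issues fm => issues ++ pvBlockA fm) [] := by
        apply PySem.List.foldl_congr_mem
        intro issues fm _
        exact pvBodyA issues fm
    _ = (PySem.List.sorted families (fun p => p.1) false).flatMap pvBlockA :=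
        PySem.List.foldl_append_eq_flatMap _ _ _
    _ = (PySem.List.sorted families (fun p => p.1) false).flatMap (fun fm => family_issues fm.1 fm.2) := by
        rw [List.flatMap, List.flatMap]
        congr 1
        apply List.map_congr_left
        intro fm hfm
        have hmem : fm ∈ families := by simpa [PySem.List.mem_sorted] using hfm
        exact pvFamily_eq fm (hpre.2 fm hmem).1 (hpre.2 fm hmem).2
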